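-- pv_equiv track=rewrite | github.com/hugovk/drop-python | utils.py | classifiers_support
-- ===== SOURCE A (Python) =====
-- CLASSIFIER = "Programming Language :: Python :: {}"
--
-- def classifiers_support(classifiers, version):
--     """Do these classifiers support this Python version?"""
--     desired_classifier = CLASSIFIER.format(version)
--     major, minor = version.split(".")
--
--     # Explicit major.minor support
--     if desired_classifier in classifiers:
--         return "yes"
--
--     # Check if classifiers are explicit.
--     # Only report "no" when at least one other major.minor version is explicitly
--     # supported (but not the desired one).
--     # ie. major and major.other present, but major.minor is missing.
--     if any(f"{major}." in c for c in classifiers):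
--         return "no"
--
--     python_any = any("Programming Language :: Python ::" in c for c in classifiers)
--     python = "Programming Language :: Python" in classifiers
--     # python2 = "Programming Language :: Python :: 2" in classifiers
--     python3 = "Programming Language :: Python :: 3" in classifiers
--     python2x = any("Programming Language :: Python :: 2." in c for c in classifiers)
--     python3x = any("Programming Language :: Python :: 3." in c for c in classifiers)
--
--     # No major.minor listed
--     if major == "2" and python and python3 and not python3x:
--         return "maybe"
--
--     if major == "2" and python3x and not python2x:
--         return "no"
--
--     # We have at least some version listed, but not even this major
--     if python_any and CLASSIFIER.format(major) not in classifiers: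
--         return "no"
--
--     # Otherwise?
--     return "maybe"
-- ===== SOURCE B (Python) =====
-- CLASSIFIER = "Programming Language :: Python :: {}"
-- PY = "Programming Language :: Python"
--
-- def classifiers_support(classifiers, version):
--     """Do these classifiers support this Python version?
--
--     Categorize each classifier once into a set of evidence tags, union the
--     tag sets, then decide with a flattened boolean formula instead of a cascade.
--     """
--     major, minor = version.split(".")
--
--     def tags(c):
--         t = set()
--         if c == PY + " :: " + version:
--             t.add("desired")
--         if major + "." in c:
--             t.add("majordot")
--         if PY + " ::" in c:
--             t.add("anypy")
--         if c == PY: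
--             t.add("py")
--         if c == PY + " :: 3":
--             t.add("py3")
--         if PY + " :: 2." in c:
--             t.add("py2x")
--         if PY + " :: 3." in c:
--             t.add("py3x")
--         if c == PY + " :: " + major:
--             t.add("majorver")
--         return t
--
--     ev = set().union(*map(tags, classifiers))
--     if "desired" in ev:
--         return "yes"
--     two = major == "2"
--     no = ("majordot" in ev
--           or (two and "py3x" in ev and "py2x" not in ev)
--           or ("anypy" in ev and "majorver" not in ev
--               and not (two and "py" in ev and "py3" in ev and "py3x" not in ev)))
--     return "no" if no else "maybe"
-- ===== Notes on version B (the rewrite author's own statement) =====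
-- stated objective: alternative
-- what changed: Instead of A's eight whole-list scans feeding a four-branch decision cascade, B maps each classifier once to a set of evidence tags, unions the tag sets, and decides with a single flattened boolean formula (the cascade algebraically collapsed to one 'no' disjunction, using that the 'maybe' branch and the python3x-without-python2x branch are mutually exclusive).
import Mathlib
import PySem

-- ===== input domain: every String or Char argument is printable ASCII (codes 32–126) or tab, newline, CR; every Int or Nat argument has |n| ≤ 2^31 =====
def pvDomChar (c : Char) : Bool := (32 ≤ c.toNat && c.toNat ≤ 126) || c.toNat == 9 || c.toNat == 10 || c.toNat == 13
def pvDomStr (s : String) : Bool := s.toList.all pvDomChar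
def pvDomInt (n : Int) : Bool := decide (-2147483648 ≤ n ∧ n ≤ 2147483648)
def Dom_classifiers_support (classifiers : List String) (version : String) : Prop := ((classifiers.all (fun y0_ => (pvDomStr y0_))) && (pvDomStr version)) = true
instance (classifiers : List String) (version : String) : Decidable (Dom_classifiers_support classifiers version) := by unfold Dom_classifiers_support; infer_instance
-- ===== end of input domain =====

-- B maps each classifier once to a set of evidence tags, unions them, and decides via a flattened boolean formula instead of A's eight scans + four-branch cascade (objective: alternative).


-- ===== PORT A =====
-- literal transliteration: each `any`/membership is its own scan of `classifiers`
def classifiers_support (classifiers : List String) (version : String) : String :=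
  let desired_classifier := "Programming Language :: Python :: " ++ version
  match PySem.Str.split? version "." with
  | some [major, _minor] =>
    if classifiers.any (fun c => desired_classifier == c) then "yes"
    else if classifiers.any (fun c => PySem.Str.isIn (major ++ ".") c) then "no"
    else
      let python_any := classifiers.any (fun c => PySem.Str.isIn "Programming Language :: Python ::" c)
      let python := classifiers.any (fun c => "Programming Language :: Python" == c)
      let python3 := classifiers.any (fun c => "Programming Language :: Python :: 3" == c)
      let python2x := classifiers.any (fun c => PySem.Str.isIn "Programming Language :: Python :: 2." c)
      let python3x := classifiers.any (fun c => PySem.Str.isIn "Programming Language :: Python :: 3." c)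
      if major == "2" && python && python3 && !python3x then "maybe"
      else if major == "2" && python3x && !python2x then "no"
      else if python_any && !(classifiers.any (fun c => ("Programming Language :: Python :: " ++ major) == c)) then "no"
      else "maybe"
  | _ => ""  -- Python raises ValueError here (unpacking); excluded by Pre_

-- ===== PORT B =====
-- categorize one classifier into its set of evidence tags (Python's local `tags`)
def pvTags (version major : String) (c : String) : PySem.Set String :=
  let t0 : PySem.Set String := PySem.Set.empty
  let t1 := if c == "Programming Language :: Python" ++ " :: " ++ version then PySem.Set.add t0 "desired" else t0
  let t2 := if PySem.Str.isIn (major ++ ".") c then PySem.Set.add t1 "majordot" else t1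
  let t3 := if PySem.Str.isIn ("Programming Language :: Python" ++ " ::") c then PySem.Set.add t2 "anypy" else t2
  let t4 := if c == "Programming Language :: Python" then PySem.Set.add t3 "py" else t3
  let t5 := if c == "Programming Language :: Python" ++ " :: 3" then PySem.Set.add t4 "py3" else t4
  let t6 := if PySem.Str.isIn ("Programming Language :: Python" ++ " :: 2.") c then PySem.Set.add t5 "py2x" else t5
  let t7 := if PySem.Str.isIn ("Programming Language :: Python" ++ " :: 3.") c then PySem.Set.add t6 "py3x" else t6
  if c == "Programming Language :: Python" ++ " :: " ++ major then PySem.Set.add t7 "majorver" else t7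

def classifiers_support_alt (classifiers : List String) (version : String) : String :=
  match PySem.Str.split? version "." with
  | none => ""  -- unreachable: sep is nonempty
  | some parts =>
    match parts with
    | [] => ""
    | major :: rest =>
    match rest with
    | [] => ""
    | _minor :: rest2 =>
    match rest2 with
    | _ :: _ => ""
    | [] =>
    -- ev = set().union(*map(tags, classifiers))
    let ev := (classifiers.map (pvTags version major)).foldl PySem.Set.union PySem.Set.empty
    if PySem.Set.contains ev "desired" then "yes"
    else
      let two := major == "2"
      let no := PySem.Set.contains ev "majordot"
        || (two && PySem.Set.contains ev "py3x" && !(PySem.Set.contains ev "py2x"))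
        || (PySem.Set.contains ev "anypy" && !(PySem.Set.contains ev "majorver")
            && !(two && PySem.Set.contains ev "py" && PySem.Set.contains ev "py3" && !(PySem.Set.contains ev "py3x")))
      if no then "no" else "maybe"

-- ===== PRECONDITION & SPEC =====
-- Pre_ excludes inputs where `major, minor = version.split(".")` raises ValueError
-- (version does not contain exactly one "."); nothing else is excluded.
def Pre_classifiers_support (classifiers : List String) (version : String) : Prop :=
  ((PySem.Str.split? version ".").getD []).length = 2
instance (classifiers : List String) (version : String) : Decidable (Pre_classifiers_support classifiers version) := by unfold Pre_classifiers_support; infer_instance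

def pvWitness_classifiers_support : List String × String :=
  (["Programming Language :: Python :: 3.6"], "3.6")

def Spec_classifiers_support (classifiers : List String) (version : String) (out : String) : Prop := out = classifiers_support_alt classifiers version
instance (classifiers : List String) (version : String) (out : String) : Decidable (Spec_classifiers_support classifiers version out) := by unfold Spec_classifiers_support; infer_instance

-- ===== CLAIM (what is proved, stated in full; the proofs are below) =====
def Claim_equal_classifiers_support : Prop := ∀ (classifiers : List String) (version : String), Dom_classifiers_support classifiers version → Pre_classifiers_support classifiers version → Spec_classifiers_support classifiers version (classifiers_support classifiers version)

-- ===== LEMMAS AND PROOFS =====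

theorem pv_mem_ite_add (b : Bool) (s : PySem.Set String) (x t : String) :
    (t ∈ (if b then PySem.Set.add s x else s)) ↔ (t ∈ s ∨ (t = x ∧ b = true)) := by
  cases b <;> simp [PySem.Set.mem_add]

-- membership in the folded union of mapped tag sets = some classifier carries the tag
theorem pv_mem_foldl_union (t : String) (cs : List String) (f : String → PySem.Set String)
    (acc : PySem.Set String) :
    (t ∈ (cs.map f).foldl PySem.Set.union acc) ↔ (t ∈ acc ∨ cs.any (fun c => decide (t ∈ f c)) = true) := by
  induction cs generalizing acc with
  | nil => simp
  | cons c cs ih =>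
    simp [ih, PySem.Set.mem_union, or_assoc]

-- membership of each literal tag in pvTags is the corresponding per-classifier test
theorem pv_mem_tags (version major c : String) (t : String) :
    (t ∈ pvTags version major c) ↔
      ((t = "desired" ∧ (c == "Programming Language :: Python :: " ++ version) = true) ∨
       (t = "majordot" ∧ PySem.Str.isIn (major ++ ".") c = true) ∨
       (t = "anypy" ∧ PySem.Str.isIn "Programming Language :: Python ::" c = true) ∨
       (t = "py" ∧ (c == "Programming Language :: Python") = true) ∨
       (t = "py3" ∧ (c == "Programming Language :: Python :: 3") = true) ∨
       (t = "py2x" ∧ PySem.Str.isIn "Programming Language :: Python :: 2." c = true) ∨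
       (t = "py3x" ∧ PySem.Str.isIn "Programming Language :: Python :: 3." c = true) ∨
       (t = "majorver" ∧ (c == "Programming Language :: Python :: " ++ major) = true)) := by
  unfold pvTags
  simp only [pv_mem_ite_add, PySem.Set.empty]
  simp [or_assoc]

theorem pv_ev_desired (version major c : String) :
    decide ("desired" ∈ pvTags version major c) = (c == "Programming Language :: Python :: " ++ version) := by
  rw [Bool.eq_iff_iff]; simp [pv_mem_tags]

theorem pv_ev_majordot (version major c : String) :
    decide ("majordot" ∈ pvTags version major c) = PySem.Str.isIn (major ++ ".") c := by
  rw [Bool.eq_iff_iff]; simp [pv_mem_tags]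

theorem pv_ev_anypy (version major c : String) :
    decide ("anypy" ∈ pvTags version major c) = PySem.Str.isIn "Programming Language :: Python ::" c := by
  rw [Bool.eq_iff_iff]; simp [pv_mem_tags]

theorem pv_ev_py (version major c : String) :
    decide ("py" ∈ pvTags version major c) = (c == "Programming Language :: Python") := by
  rw [Bool.eq_iff_iff]; simp [pv_mem_tags]

theorem pv_ev_py3 (version major c : String) :
    decide ("py3" ∈ pvTags version major c) = (c == "Programming Language :: Python :: 3") := by
  rw [Bool.eq_iff_iff]; simp [pv_mem_tags]

theorem pv_ev_py2x (version major c : String) :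
    decide ("py2x" ∈ pvTags version major c) = PySem.Str.isIn "Programming Language :: Python :: 2." c := by
  rw [Bool.eq_iff_iff]; simp [pv_mem_tags]

theorem pv_ev_py3x (version major c : String) :
    decide ("py3x" ∈ pvTags version major c) = PySem.Str.isIn "Programming Language :: Python :: 3." c := by
  rw [Bool.eq_iff_iff]; simp [pv_mem_tags]

theorem pv_ev_majorver (version major c : String) :
    decide ("majorver" ∈ pvTags version major c) = (c == "Programming Language :: Python :: " ++ major) := by
  rw [Bool.eq_iff_iff]; simp [pv_mem_tags]

theorem pv_any_beq_comm (l : List String) (a : String) :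
    l.any (fun c => a == c) = l.any (fun c => c == a) := by
  congr 1
  funext c
  by_cases h : a = c
  · subst h; rfl
  · rw [beq_eq_false_iff_ne.mpr h, beq_eq_false_iff_ne.mpr (Ne.symm h)]

-- contains on the unioned tag sets, as a Bool equation, for a literal tag
theorem pv_contains_ev (version major : String) (cs : List String) (t : String) :
    PySem.Set.contains ((cs.map (pvTags version major)).foldl PySem.Set.union PySem.Set.empty) t
      = cs.any (fun c => decide (t ∈ pvTags version major c)) := by
  rw [Bool.eq_iff_iff, PySem.Set.contains_iff, pv_mem_foldl_union]
  simp [PySem.Set.empty]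

-- ===== VERDICT (by name: the statement is the Claim_ definition above) =====
theorem classifiers_support_spec : Claim_equal_classifiers_support := by
  intro classifiers version _ _
  unfold Spec_classifiers_support classifiers_support classifiers_support_alt
  cases h : PySem.Str.split? version "." with
  | none => rfl
  | some parts =>
    match parts with
    | [] => rfl
    | [_] => rfl
    | _ :: _ :: _ :: _ => rfl
    | [major, minor] =>
      simp only [pv_contains_ev, pv_ev_desired, pv_ev_majordot, pv_ev_anypy, pv_ev_py,
        pv_ev_py3, pv_ev_py2x, pv_ev_py3x, pv_ev_majorver]
      rw [pv_any_beq_comm classifiers ("Programming Language :: Python :: " ++ version),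
          pv_any_beq_comm classifiers "Programming Language :: Python",
          pv_any_beq_comm classifiers "Programming Language :: Python :: 3",
          pv_any_beq_comm classifiers ("Programming Language :: Python :: " ++ major)]
      generalize classifiers.any (fun c => c == "Programming Language :: Python :: " ++ version) = bd
      generalize classifiers.any (fun c => PySem.Str.isIn (major ++ ".") c) = bmd
      generalize classifiers.any (fun c => PySem.Str.isIn "Programming Language :: Python ::" c) = bpa
      generalize classifiers.any (fun c => c == "Programming Language :: Python") = bp
      generalize classifiers.any (fun c => c == "Programming Language :: Python :: 3") = bp3
      generalize classifiers.any (fun c => PySem.Str.isIn "Programming Language :: Python :: 2." c) = b2x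
      generalize classifiers.any (fun c => PySem.Str.isIn "Programming Language :: Python :: 3." c) = b3x
      generalize classifiers.any (fun c => c == "Programming Language :: Python :: " ++ major) = bmj
      generalize (major == "2") = btwo
      revert bd bmd bpa bp bp3 b2x b3x bmj btwo
      decide
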